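-- pv_equiv track=rewrite | github.com/Theeoi/PyExercise | exercises/thinkpython2e/chap9.py | has_tridouble
-- ===== SOURCE A (Python) =====
-- def has_tridouble(word: str) -> bool:
--     if len(word) < 6:
--         return False
--     i = 0
--     while i < len(word) - 5:
--         if word[i+1] == word[i] and word[i+3] == word[i+2] and \
--         word[i+5] == word[i+4]:
--             return True
--         i += 1
--     return False
-- ===== SOURCE B (Python) =====
-- def has_tridouble(word: str) -> bool:
--     doubles = {k for k in range(len(word) - 1) if word[k] == word[k + 1]}
--     return any(k + 2 in doubles and k + 4 in doubles for k in doubles)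
-- ===== Notes on version B (the rewrite author's own statement) =====
-- stated objective: alternative
-- what changed: Replaced A's manual sliding-window index scan with a set comprehension collecting the positions of doubled letters, then a membership test that k+2 and k+4 are also doubled positions.
import Mathlib
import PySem

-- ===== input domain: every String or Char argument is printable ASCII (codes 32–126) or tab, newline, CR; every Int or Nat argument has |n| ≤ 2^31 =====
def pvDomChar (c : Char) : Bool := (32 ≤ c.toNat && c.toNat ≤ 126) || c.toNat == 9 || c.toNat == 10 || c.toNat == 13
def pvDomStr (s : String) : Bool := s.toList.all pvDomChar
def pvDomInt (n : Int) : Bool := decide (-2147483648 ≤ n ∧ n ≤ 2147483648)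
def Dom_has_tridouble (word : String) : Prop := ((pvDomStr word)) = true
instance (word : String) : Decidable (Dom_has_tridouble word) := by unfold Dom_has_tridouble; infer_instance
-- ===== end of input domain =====

-- B replaces A's index-by-index window scan by first collecting the set of doubled-pair
-- positions and then testing the arithmetic pattern {k, k+2, k+4} ⊆ set (objective: alternative).

-- ===== PORT A =====
-- the three-way condition of A's if, literally (word[i+1]==word[i] and word[i+3]==word[i+2] and word[i+5]==word[i+4])
def pvCondA (l : List Char) (i : Int) : Bool :=
  (PySem.Chars.pyGet? l (i+1) == PySem.Chars.pyGet? l i) &&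
  (PySem.Chars.pyGet? l (i+3) == PySem.Chars.pyGet? l (i+2)) &&
  (PySem.Chars.pyGet? l (i+5) == PySem.Chars.pyGet? l (i+4))

-- the while loop of A
def pvLoopA (l : List Char) (n i : Int) : Bool :=
  if i < n - 5 then
    if pvCondA l i then true else pvLoopA l n (i+1)
  else false
termination_by (n - 5 - i).toNat
decreasing_by omega

def has_tridouble (word : String) : Bool :=
  if PySem.Str.len word < 6 then false
  else pvLoopA word.toList (PySem.Str.len word) 0

-- ===== PORT B =====
def has_tridouble_alt (word : String) : Bool :=
  let l := word.toList
  let doubles : List Int := PySem.Set.ofList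
    ((PySem.List.pyRange 0 (PySem.Str.len word - 1) 1).filter
      (fun k => PySem.Chars.pyGet? l k == PySem.Chars.pyGet? l (k+1)))
  doubles.any (fun k => doubles.contains (k+2) && doubles.contains (k+4))

-- ===== PRECONDITION & SPEC =====
def Spec_has_tridouble (word : String) (out : Bool) : Prop := out = has_tridouble_alt word
instance (word : String) (out : Bool) : Decidable (Spec_has_tridouble word out) := by unfold Spec_has_tridouble; infer_instance

-- ===== CLAIM (what is proved, stated in full; the proofs are below) =====
def Claim_equal_has_tridouble : Prop := ∀ (word : String), Dom_has_tridouble word → Spec_has_tridouble word (has_tridouble word)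

-- ===== LEMMAS AND PROOFS =====

-- the A-loop finds an index ≥ i satisfying the condition, and nothing else
theorem pvLoopA_true_iff (l : List Char) (n i : Int) :
    pvLoopA l n i = true ↔ ∃ j : Int, i ≤ j ∧ j < n - 5 ∧ pvCondA l j = true := by
  rw [pvLoopA]
  split_ifs with h1 h2
  · simp only [true_iff]
    exact ⟨i, le_refl i, h1, h2⟩
  · rw [pvLoopA_true_iff l n (i+1)]
    constructor
    · rintro ⟨j, hj1, hj2, hj3⟩; exact ⟨j, by omega, hj2, hj3⟩
    · rintro ⟨j, hj1, hj2, hj3⟩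
      refine ⟨j, ?_, hj2, hj3⟩
      rcases eq_or_lt_of_le hj1 with h | h
      · exact absurd (h ▸ hj3) (by simp [h2])
      · omega
  · simp only [false_iff]
    rintro ⟨j, hj1, hj2, _⟩; omega
termination_by (n - 5 - i).toNat
decreasing_by omega

-- membership in B's doubles set
theorem pvMem_doubles (word : String) (k : Int) :
    k ∈ PySem.Set.ofList
      ((PySem.List.pyRange 0 (PySem.Str.len word - 1) 1).filter
        (fun k => PySem.Chars.pyGet? word.toList k == PySem.Chars.pyGet? word.toList (k+1)))
    ↔ (0 ≤ k ∧ k < PySem.Str.len word - 1 ∧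
        (PySem.Chars.pyGet? word.toList k == PySem.Chars.pyGet? word.toList (k+1)) = true) := by
  rw [PySem.Set.mem_ofList, List.mem_filter, PySem.List.mem_pyRange_one]
  tauto

theorem has_tridouble_eq (word : String) : has_tridouble word = has_tridouble_alt word := by
  set l := word.toList with hl
  set n : Int := PySem.Str.len word with hn
  have halt : has_tridouble_alt word = true ↔
      ∃ k : Int, (0 ≤ k ∧ k < n - 1 ∧ (PySem.Chars.pyGet? l k == PySem.Chars.pyGet? l (k+1)) = true)
        ∧ (0 ≤ k+2 ∧ k+2 < n - 1 ∧ (PySem.Chars.pyGet? l (k+2) == PySem.Chars.pyGet? l (k+3)) = true)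
        ∧ (0 ≤ k+4 ∧ k+4 < n - 1 ∧ (PySem.Chars.pyGet? l (k+4) == PySem.Chars.pyGet? l (k+5)) = true) := by
    unfold has_tridouble_alt
    rw [List.any_eq_true]
    constructor
    · rintro ⟨k, hk, hp⟩
      rw [Bool.and_eq_true, List.contains_iff_mem, List.contains_iff_mem] at hp
      rw [pvMem_doubles] at hk
      have h2 := (pvMem_doubles word (k+2)).mp hp.1
      have h4 := (pvMem_doubles word (k+4)).mp hp.2
      exact ⟨k, hk, by rw [show k+2+1 = k+3 by ring] at h2; exact h2,
        by rw [show k+4+1 = k+5 by ring] at h4; exact h4⟩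
    · rintro ⟨k, h0, h2, h4⟩
      refine ⟨k, (pvMem_doubles word k).mpr h0, ?_⟩
      rw [Bool.and_eq_true, List.contains_iff_mem, List.contains_iff_mem]
      exact ⟨(pvMem_doubles word (k+2)).mpr (by rw [show k+2+1 = k+3 by ring]; exact h2),
             (pvMem_doubles word (k+4)).mpr (by rw [show k+4+1 = k+5 by ring]; exact h4)⟩
  have ha : has_tridouble word = true ↔
      ∃ j : Int, 0 ≤ j ∧ j < n - 5 ∧ pvCondA l j = true := by
    unfold has_tridouble
    rw [← hl, ← hn]
    split_ifs with h6
    · simp only [false_iff]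
      rintro ⟨j, hj1, hj2, _⟩; omega
    · exact pvLoopA_true_iff l n 0
  cases hb : has_tridouble_alt word
  · cases hA : has_tridouble word
    · rfl
    · exfalso
      obtain ⟨j, hj0, hj5, hc⟩ := ha.mp hA
      simp only [pvCondA, Bool.and_eq_true, beq_iff_eq] at hc
      have : has_tridouble_alt word = true := halt.mpr
        ⟨j, ⟨hj0, by omega, by simp only [beq_iff_eq]; exact hc.1.1.symm⟩,
            ⟨by omega, by omega, by simp only [beq_iff_eq]; exact hc.1.2.symm⟩,
            ⟨by omega, by omega, by simp only [beq_iff_eq]; exact hc.2.symm⟩⟩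
      simp [hb] at this
  · obtain ⟨k, ⟨hk0, hk1, he0⟩, ⟨_, hk2, he2⟩, ⟨_, hk4, he4⟩⟩ := halt.mp hb
    refine ha.mpr ⟨k, hk0, by omega, ?_⟩
    simp only [pvCondA, Bool.and_eq_true, beq_iff_eq]
    simp only [beq_iff_eq] at he0 he2 he4
    exact ⟨⟨he0.symm, he2.symm⟩, he4.symm⟩

-- ===== VERDICT (by name: the statement is the Claim_ definition above) =====
theorem has_tridouble_spec : Claim_equal_has_tridouble := by
  intro word _
  unfold Spec_has_tridouble
  exact has_tridouble_eq word
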